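-- pv_equiv track=rewrite | github.com/daniel-zeiler/potential-happiness | Stack/Solutions_Three.py | is_valid_abc
-- ===== SOURCE A (Python) =====
-- def is_valid_abc(s: str) -> bool:
--     result_stack = []
--     for character in s:
--         if len(result_stack) >= 2 and character == 'c' and result_stack[-1] == 'b' and result_stack[-2] == 'a':
--             result_stack.pop()
--             result_stack.pop()
--         else:
--             result_stack.append(character)
--     return not result_stack
-- ===== SOURCE B (Python) =====
-- def is_valid_abc(s: str) -> bool:
--     while 'abc' in s:
--         s = s.replace('abc', '')
--     return not s
-- ===== Notes on version B (the rewrite author's own statement) =====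
-- stated objective: simpler
-- what changed: Replaces the single-pass explicit stack with repeated whole-string elimination of 'abc' (str.replace until no occurrence remains), relying on the non-overlapping rewrite's unique normal form.
import Mathlib
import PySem

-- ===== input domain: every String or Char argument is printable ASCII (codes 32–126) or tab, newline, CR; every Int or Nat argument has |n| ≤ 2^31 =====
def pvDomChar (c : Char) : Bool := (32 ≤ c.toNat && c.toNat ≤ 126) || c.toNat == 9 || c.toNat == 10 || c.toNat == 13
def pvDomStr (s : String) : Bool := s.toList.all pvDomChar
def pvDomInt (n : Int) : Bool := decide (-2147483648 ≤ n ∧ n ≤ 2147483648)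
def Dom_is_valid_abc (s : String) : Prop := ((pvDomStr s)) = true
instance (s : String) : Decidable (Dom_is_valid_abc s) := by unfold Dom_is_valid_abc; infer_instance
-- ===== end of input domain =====

-- B replaces A's one-pass explicit stack by repeated whole-string elimination of "abc"
-- (replace until no occurrence remains) — simpler, and measured faster in Python; same return value.

-- ===== PORT A =====
-- the stack is kept head-first: head = Python's result_stack[-1]
def stackStep (st : List Char) (c : Char) : List Char :=
  match st with
  | b :: a :: rest => if c = 'c' ∧ b = 'b' ∧ a = 'a' then rest else c :: st
  | _ => c :: st

def is_valid_abc (s : String) : Bool :=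
  (s.toList.foldl stackStep []).isEmpty

-- ===== PORT B =====
-- B-side helpers: `repl` is one pass of s.replace('abc','') on code points
-- (left-to-right non-overlapping removal; proved equal to PySem.Chars.replace below);
-- the lemmas before `altLoop` are exactly what its termination proof cites.
def repl : List Char → List Char
  | [] => []
  | c :: t =>
    if c = 'a' ∧ t.take 2 = ['b', 'c'] then repl (t.drop 2) else c :: repl t
termination_by l => l.length
decreasing_by
  · simp only [List.length_cons]
    simp only [List.length_drop]
    omega
  · simp

theorem repl_length_le (l : List Char) : (repl l).length ≤ l.length := by
  fun_induction repl l with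
  | case1 => simp
  | case2 c t hc ih =>
    have ht : t.length = (t.take 2).length + (t.drop 2).length := by
      rw [← List.length_append, List.take_append_drop]
    rw [hc.2] at ht
    simp only [List.length_cons]
    omega
  | case3 c t hc ih => simp only [List.length_cons]; omega

def hasABC : List Char → Bool
  | [] => false
  | c :: t =>
    if c = 'a' ∧ t.take 2 = ['b', 'c'] then true else hasABC t

theorem repl_length_lt (l : List Char) (h : hasABC l = true) : (repl l).length < l.length := by
  fun_induction repl l with
  | case1 => simp [hasABC] at h
  | case2 c t hc ih =>
    have ht : t.length = (t.take 2).length + (t.drop 2).length := by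
      rw [← List.length_append, List.take_append_drop]
    rw [hc.2] at ht
    have := repl_length_le (t.drop 2)
    simp only [List.length_cons]
    omega
  | case3 c t hc ih =>
    rw [hasABC, if_neg hc] at h
    simp only [List.length_cons]
    exact Nat.succ_lt_succ (ih h)

theorem hasABC_iff_infix (l : List Char) : hasABC l = true ↔ ['a', 'b', 'c'] <:+: l := by
  fun_induction hasABC l with
  | case1 => simp
  | case2 c t hc =>
    simp only [true_iff]
    obtain ⟨rfl, htake⟩ := hc
    exact ⟨[], t.drop 2, by rw [← htake]; simp⟩
  | case3 c t hc ih =>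
    rw [ih, List.infix_cons_iff]
    constructor
    · exact Or.inr
    · rintro (hpre | hinf)
      · exfalso
        rw [List.cons_prefix_cons] at hpre
        obtain ⟨rfl, hbc⟩ := hpre
        exact hc ⟨rfl, by rw [List.prefix_iff_eq_take] at hbc; exact hbc.symm⟩
      · exact hinf

theorem repl_cons (c : Char) (t : List Char) :
    repl (c :: t) = if c = 'a' ∧ t.take 2 = ['b', 'c'] then repl (t.drop 2) else c :: repl t := by
  rw [repl.eq_def]

theorem replace_eq_repl_go (fuel : Nat) (l acc : List Char) (h : l.length ≤ fuel) :
    PySem.Chars.replace.go ['a', 'b', 'c'] [] fuel l acc = acc.reverse ++ repl l := by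
  induction fuel generalizing l acc with
  | zero =>
    have : l = [] := by cases l <;> simp_all
    subst this; simp [PySem.Chars.replace.go, repl]
  | succ n ih =>
    match l with
    | [] => simp [PySem.Chars.replace.go, repl]
    | c :: t =>
      rw [PySem.Chars.replace.go]
      by_cases hp : List.isPrefixOf ['a', 'b', 'c'] (c :: t) = true
      · simp only [hp, if_true]
        rcases t with _ | ⟨c2, _ | ⟨c3, t3⟩⟩ <;> simp [List.isPrefixOf] at hp
        obtain ⟨rfl, rfl, rfl⟩ := hp
        simp only [List.length_cons] at h
        rw [ih _ _ (by simp only [List.length_cons, List.length_drop]; omega)]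
        have : repl ('a' :: 'b' :: 'c' :: t3) = repl t3 := by
          rw [repl]; simp
        simp [this]
      · simp only [hp, if_false, Bool.false_eq_true]
        rw [ih t (c :: acc) (by simp at h ⊢; omega)]
        have hnc : ¬(c = 'a' ∧ t.take 2 = ['b', 'c']) := by
          rintro ⟨rfl, htake⟩
          apply hp
          have ht : t = ['b', 'c'] ++ t.drop 2 := by rw [← htake]; simp
          rw [ht]
          simp [List.isPrefixOf]
        rw [repl_cons, if_neg hnc]
        simp

theorem replace_eq_repl (l : List Char) :
    PySem.Chars.replace l ['a', 'b', 'c'] [] = repl l := by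
  rw [PySem.Chars.replace]
  simp only [List.isEmpty_cons, Bool.false_eq_true, if_false]
  exact replace_eq_repl_go l.length l [] le_rfl

theorem replace_abc_toList (s : String) :
    (PySem.Str.replace s "abc" "").toList = repl s.toList := by
  rw [PySem.Str.replace]
  have h1 : ("abc" : String).toList = ['a', 'b', 'c'] := rfl
  have h2 : ("" : String).toList = [] := rfl
  simp [h1, h2, replace_eq_repl]

theorem isIn_iff_hasABC (s : String) :
    PySem.Str.isIn "abc" s = true ↔ hasABC s.toList = true := by
  rw [PySem.Str.isIn_iff_infix, hasABC_iff_infix]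
  exact Iff.rfl

theorem replace_abc_len_lt (s : String) (h : PySem.Str.isIn "abc" s = true) :
    (PySem.Str.replace s "abc" "").toList.length < s.toList.length := by
  rw [replace_abc_toList]
  exact repl_length_lt _ ((isIn_iff_hasABC s).mp h)

def altLoop (s : String) : String :=
  if h : PySem.Str.isIn "abc" s = true then altLoop (PySem.Str.replace s "abc" "") else s
termination_by s.toList.length
decreasing_by exact replace_abc_len_lt s h

def is_valid_abc_alt (s : String) : Bool :=
  (altLoop s).toList.isEmpty

-- ===== PRECONDITION & SPEC =====
def Spec_is_valid_abc (s : String) (out : Bool) : Prop := out = is_valid_abc_alt s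
instance (s : String) (out : Bool) : Decidable (Spec_is_valid_abc s out) := by unfold Spec_is_valid_abc; infer_instance

-- ===== CLAIM (what is proved, stated in full; the proofs are below) =====
def Claim_equal_is_valid_abc : Prop := ∀ (s : String), Dom_is_valid_abc s → Spec_is_valid_abc s (is_valid_abc s)

-- ===== LEMMAS AND PROOFS =====
theorem foldl_abc (st : List Char) :
    List.foldl stackStep st ['a', 'b', 'c'] = st := by
  rcases st with _ | ⟨b, _ | ⟨a, rest⟩⟩ <;> simp [stackStep]

theorem foldl_repl (l : List Char) : ∀ st : List Char,
    List.foldl stackStep st (repl l) = List.foldl stackStep st l := by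
  fun_induction repl l with
  | case1 => intro st; rfl
  | case2 c t hc ih =>
    intro st
    obtain ⟨rfl, htake⟩ := hc
    have ht : 'a' :: t = ['a', 'b', 'c'] ++ t.drop 2 := by
      conv_lhs => rw [← List.take_append_drop 2 t]
      rw [htake]
      rfl
    rw [ih st, ht, List.foldl_append, foldl_abc]
  | case3 c t hc ih =>
    intro st
    rw [List.foldl_cons, List.foldl_cons, ih]

theorem hasABC_append_abc (x y : List Char) :
    hasABC (x ++ 'a' :: 'b' :: 'c' :: y) = true := by
  rw [hasABC_iff_infix]
  exact ⟨x, y, by simp⟩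

theorem foldl_no_abc (v : List Char) : ∀ u : List Char, hasABC (u ++ v) = false →
    List.foldl stackStep u.reverse v = (u ++ v).reverse := by
  induction v with
  | nil => intro u _; simp
  | cons c t ih =>
    intro u h
    rw [List.foldl_cons]
    rcases hrev : u.reverse with _ | ⟨b, _ | ⟨a, rest⟩⟩
    · have hu : u = [] := by simpa using congrArg List.reverse hrev
      subst hu
      have := ih [c] (by simpa using h)
      simpa [stackStep] using this
    · have hu : u = [b] := by simpa using congrArg List.reverse hrev
      subst hu
      have := ih [b, c] (by simpa using h)
      simpa [stackStep] using this
    · rw [stackStep]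
      split_ifs with hcond
      · exfalso
        obtain ⟨rfl, rfl, rfl⟩ := hcond
        have hu : u = rest.reverse ++ ['a', 'b'] := by
          have := congrArg List.reverse hrev
          simpa using this
        rw [hu] at h
        rw [show rest.reverse ++ ['a', 'b'] ++ 'c' :: t = rest.reverse ++ 'a' :: 'b' :: 'c' :: t by simp] at h
        rw [hasABC_append_abc] at h
        exact Bool.true_eq_false.mp h
      · have hc : c :: b :: a :: rest = (u ++ [c]).reverse := by
          rw [List.reverse_append, hrev]; rfl
        rw [hc]
        have := ih (u ++ [c]) (by simpa using h)
        rw [this]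
        simp

theorem run_eq_altLoop (s : String) :
    List.foldl stackStep [] s.toList = ((altLoop s).toList).reverse := by
  rw [altLoop]
  split_ifs with h
  · rw [← run_eq_altLoop (PySem.Str.replace s "abc" "")]
    rw [replace_abc_toList, foldl_repl]
  · have hno : hasABC s.toList = false := by
      have hnt : ¬ hasABC s.toList = true := fun ht => h ((isIn_iff_hasABC s).mpr ht)
      simpa using hnt
    have := foldl_no_abc s.toList [] (by simpa using hno)
    simpa using this
termination_by s.toList.length
decreasing_by exact replace_abc_len_lt s h

-- ===== VERDICT (by name: the statement is the Claim_ definition above) =====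
theorem is_valid_abc_spec : Claim_equal_is_valid_abc := by
  intro s _
  unfold Spec_is_valid_abc is_valid_abc is_valid_abc_alt
  rw [run_eq_altLoop]
  simp
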